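-- pv_equiv track=rewrite | github.com/jdolivet/DIU-EIL | Evaluation_Bloc_2/Algorithmique/TriBullesComplexite.py | triBulles
-- ===== SOURCE A (Python) =====
-- def triBulles(tableau):
--     """ Tri bulles sur la liste passée en paramètre.
--     Retourne le nombre de comparaisons et d'échanges effectués."""
--     comparaisons, echanges = 0, 0
--     for i in range(len(tableau) - 1, 0, -1):
--         for j in range(0, i):
--             if tableau[j] > tableau[j + 1]:
--                 tableau[j], tableau[j + 1] = tableau[j + 1], tableau[j]
--                 echanges += 1
--             comparaisons += 1
--     return comparaisons, echanges
-- ===== SOURCE B (Python) =====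
-- def triBulles(tableau):
--     """ Tri bulles sur la liste passée en paramètre.
--     Retourne le nombre de comparaisons et d'échanges effectués.
--     (Counting only: unlike A, does not sort/mutate tableau; the equivalence
--     claimed is about the return value.)"""
--     n = len(tableau)
--     comparaisons = n * (n - 1) // 2
--     echanges = 0
--     for j, x in enumerate(tableau):
--         for y in tableau[j + 1:]:
--             if x > y:
--                 echanges += 1
--     return comparaisons, echanges
-- ===== Notes on version B (the rewrite author's own statement) =====
-- stated objective: alternative
-- what changed: Instead of simulating the bubble sort (mutating the list and counting swaps as they happen), B returns the closed form n(n-1)/2 for comparisons and counts the swaps as the number of inverted pairs (j<k with tableau[j]>tableau[k]) of the untouched input, which equals bubble sort's swap count; B does not mutate tableau.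
import Mathlib
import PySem

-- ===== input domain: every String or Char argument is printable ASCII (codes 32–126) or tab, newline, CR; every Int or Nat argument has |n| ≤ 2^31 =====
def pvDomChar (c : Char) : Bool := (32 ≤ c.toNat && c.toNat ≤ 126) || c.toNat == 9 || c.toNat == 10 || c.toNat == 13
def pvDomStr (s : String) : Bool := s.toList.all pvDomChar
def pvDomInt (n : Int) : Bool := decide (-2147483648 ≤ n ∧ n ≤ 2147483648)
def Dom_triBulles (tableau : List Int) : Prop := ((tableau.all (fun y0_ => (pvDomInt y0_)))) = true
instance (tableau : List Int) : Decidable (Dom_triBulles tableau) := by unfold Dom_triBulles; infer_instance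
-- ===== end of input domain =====

-- B replaces the swap-counting bubble sort by a closed form for comparisons and a direct
-- count of inverted pairs for swaps (no mutation; the equivalence is about the return value —
-- A additionally sorts its argument in place).

-- ===== PORT A =====
-- Literal port of A: state (tableau, comparaisons, echanges); the indices j, j+1 produced by
-- the ranges are always within bounds, so pyGetD/pySetD are exact here (no IndexError).
def triBulles (tableau : List Int) : Int × Int :=
  let st := (PySem.List.pyRange ((tableau.length : Int) - 1) 0 (-1)).foldl
    (fun (st : List Int × Int × Int) i =>
      (PySem.List.pyRange 0 i 1).foldl
        (fun (st2 : List Int × Int × Int) j =>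
          let a := PySem.List.pyGetD st2.1 j 0
          let b := PySem.List.pyGetD st2.1 (j + 1) 0
          if a > b then
            (PySem.List.pySetD (PySem.List.pySetD st2.1 j b) (j + 1) a,
             st2.2.1 + 1, st2.2.2 + 1)
          else
            (st2.1, st2.2.1 + 1, st2.2.2)) st)
    (tableau, 0, 0)
  (st.2.1, st.2.2)

-- ===== PORT B =====
def triBulles_alt (tableau : List Int) : Int × Int :=
  let n : Int := tableau.length
  let comparaisons := PySem.Int.floordiv (n * (n - 1)) 2
  let echanges := (PySem.List.enumerate tableau 0).foldl
    (fun (e : Int) jx =>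
      (PySem.List.slice tableau (some (jx.1 + 1)) none).foldl
        (fun (e : Int) y => if jx.2 > y then e + 1 else e) e) 0
  (comparaisons, echanges)

-- ===== PRECONDITION & SPEC =====
def Spec_triBulles (tableau : List Int) (out : Int × Int) : Prop := out = triBulles_alt tableau
instance (tableau : List Int) (out : Int × Int) : Decidable (Spec_triBulles tableau out) := by unfold Spec_triBulles; infer_instance

-- ===== CLAIM (what is proved, stated in full; the proofs are below) =====
def Claim_equal_triBulles : Prop := ∀ (tableau : List Int), Dom_triBulles tableau → Spec_triBulles tableau (triBulles tableau)

-- ===== LEMMAS AND PROOFS =====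

-- Proof-side model of one bubble pass limited to k comparisons (positions 0..k).
def passN : Nat → List Int → List Int × Nat
  | 0, t => (t, 0)
  | _ + 1, [] => ([], 0)
  | _ + 1, [x] => ([x], 0)
  | k + 1, x :: y :: t =>
    if y < x then
      let r := passN k (x :: t); (y :: r.1, r.2 + 1)
    else
      let r := passN k (y :: t); (x :: r.1, r.2)

-- The outer loop: passes with bounds m, m-1, ..., 1.
def sweep : Nat → List Int → List Int × Nat
  | 0, t => (t, 0)
  | m + 1, t =>
    let r := passN (m + 1) t
    let r2 := sweep m r.1
    (r2.1, r.2 + r2.2)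

-- Number of inversions of a list.
def inv : List Int → Nat
  | [] => 0
  | x :: t => t.countP (fun y => decide (y < x)) + inv t

def sumTo : Nat → Nat
  | 0 => 0
  | m + 1 => (m + 1) + sumTo m

lemma passN_perm (k : Nat) (t : List Int) : (passN k t).1.Perm t := by
  induction k generalizing t with
  | zero => simp [passN]
  | succ k ih =>
    match t with
    | [] => simp [passN]
    | [x] => simp [passN]
    | x :: y :: t =>
      by_cases h : y < x
      · simp only [passN, if_pos h]
        exact ((ih (x :: t)).cons y).trans (List.Perm.swap x y t)
      · simp only [passN, if_neg h]
        exact (ih (y :: t)).cons x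

lemma passN_length (k : Nat) (t : List Int) : (passN k t).1.length = t.length :=
  (passN_perm k t).length_eq

lemma passN_drop (k : Nat) (t : List Int) :
    (passN k t).1.drop (k + 1) = t.drop (k + 1) := by
  induction k generalizing t with
  | zero => simp [passN]
  | succ k ih =>
    match t with
    | [] => simp [passN]
    | [x] => simp [passN]
    | x :: y :: t =>
      by_cases h : y < x
      · simpa only [passN, if_pos h, List.drop_succ_cons] using ih (x :: t)
      · simpa only [passN, if_neg h, List.drop_succ_cons] using ih (y :: t)

lemma passN_swaps (k : Nat) (t : List Int) :
    (passN k t).2 + inv (passN k t).1 = inv t := by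
  induction k generalizing t with
  | zero => simp [passN]
  | succ k ih =>
    match t with
    | [] => simp [passN]
    | [x] => simp [passN]
    | x :: y :: t =>
      by_cases h : y < x
      · have hc : (passN k (x :: t)).1.countP (fun z => decide (z < y))
            = (x :: t).countP (fun z => decide (z < y)) :=
          (passN_perm k (x :: t)).countP_eq _
        have hih := ih (x :: t)
        have hxy : ¬ x < y := not_lt.2 h.le
        simp only [passN, if_pos h, inv, hc, List.countP_cons, decide_eq_true_eq,
          if_neg hxy] at *
        omega
      · have hc : (passN k (y :: t)).1.countP (fun z => decide (z < x))
            = (y :: t).countP (fun z => decide (z < x)) :=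
          (passN_perm k (y :: t)).countP_eq _
        have hih := ih (y :: t)
        simp only [passN, if_neg h, inv, hc, List.countP_cons, decide_eq_true_eq] at *
        omega

lemma passN_max (k : Nat) (t : List Int) :
    ∀ x ∈ t.take (k + 1), ∀ y ∈ ((passN k t).1.drop k).take 1, x ≤ y := by
  induction k generalizing t with
  | zero =>
    match t with
    | [] => simp
    | a :: t => simp [passN]
  | succ k ih =>
    match t with
    | [] => simp [passN]
    | [x] => simp [passN]
    | x :: y :: t =>
      by_cases h : y < x
      · simp only [passN, if_pos h, List.drop_succ_cons]
        intro a ha z hz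
        have hx : x ≤ z := ih (x :: t) x (by simp) z hz
        simp only [List.take_succ_cons, List.mem_cons] at ha
        rcases ha with rfl | rfl | ha
        · exact hx
        · exact h.le.trans hx
        · exact ih (x :: t) a (by simp [List.take_succ_cons, List.mem_cons]; tauto) z hz
      · simp only [passN, if_neg h, List.drop_succ_cons]
        intro a ha z hz
        have hy : y ≤ z := ih (y :: t) y (by simp) z hz
        simp only [List.take_succ_cons, List.mem_cons] at ha
        rcases ha with rfl | rfl | ha
        · exact (not_lt.1 h).trans hy
        · exact hy
        · exact ih (y :: t) a (by simp [List.take_succ_cons, List.mem_cons]; tauto) z hz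

lemma sweep_swaps (m : Nat) (t : List Int) :
    (sweep m t).2 + inv (sweep m t).1 = inv t := by
  induction m generalizing t with
  | zero => simp [sweep]
  | succ m ih =>
    have h1 := passN_swaps (m + 1) t
    have h2 := ih (passN (m + 1) t).1
    simp only [sweep] at *
    omega

lemma inv_sorted (t : List Int) (h : t.Pairwise (· ≤ ·)) : inv t = 0 := by
  induction t with
  | nil => rfl
  | cons x t ih =>
    rw [List.pairwise_cons] at h
    have hc : t.countP (fun y => decide (y < x)) = 0 :=
      List.countP_eq_zero.2 (fun y hy => by simpa using not_lt.2 (h.1 y hy))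
    simp [inv, hc, ih h.2]

lemma sweep_sorted (m : Nat) (t : List Int)
    (h1 : (t.drop (m + 1)).Pairwise (· ≤ ·))
    (h2 : ∀ x ∈ t.take (m + 1), ∀ y ∈ t.drop (m + 1), x ≤ y) :
    ((sweep m t).1).Pairwise (· ≤ ·) := by
  induction m generalizing t with
  | zero =>
    match t with
    | [] => simp [sweep]
    | x :: t =>
      simp only [sweep, List.pairwise_cons]
      exact ⟨fun y hy => h2 x (by simp) y (by simpa using hy), by simpa using h1⟩
  | succ m ih =>
    have hdrop : (passN (m + 1) t).1.drop (m + 2) = t.drop (m + 2) := passN_drop (m + 1) t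
    have htake : ((passN (m + 1) t).1.take (m + 2)).Perm (t.take (m + 2)) := by
      have hA : (passN (m + 1) t).1.take (m + 2) ++ t.drop (m + 2) = (passN (m + 1) t).1 := by
        rw [← hdrop]; exact List.take_append_drop _ _
      have hB : t.take (m + 2) ++ t.drop (m + 2) = t := List.take_append_drop _ _
      have hp2 : ((passN (m + 1) t).1.take (m + 2) ++ t.drop (m + 2)).Perm
          (t.take (m + 2) ++ t.drop (m + 2)) := by
        rw [hA, hB]; exact passN_perm (m + 1) t
      exact (List.perm_append_right_iff _).1 hp2
    have hmax := passN_max (m + 1) t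
    have hsplit : (passN (m + 1) t).1.take (m + 2)
        = (passN (m + 1) t).1.take (m + 1) ++ ((passN (m + 1) t).1.drop (m + 1)).take 1 :=
      by rw [show m + 2 = m + 1 + 1 from rfl]; exact List.take_add
    have htail : ((passN (m + 1) t).1.drop (m + 1)).drop 1 = t.drop (m + 2) := by
      rw [List.drop_drop]; exact hdrop
    show ((sweep m (passN (m + 1) t).1).1).Pairwise (· ≤ ·)
    apply ih
    · -- (i) the dropped part of the pass result is sorted
      cases hd : (passN (m + 1) t).1.drop (m + 1) with
      | nil => simp
      | cons z w =>
        have hw : w = t.drop (m + 2) := by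
          have := htail; rw [hd] at this; simpa using this
        have hz : z ∈ t.take (m + 2) := by
          refine htake.mem_iff.1 ?_
          rw [hsplit, hd]
          simp
        rw [List.pairwise_cons]
        refine ⟨fun y hy => h2 z hz y (by rw [hw] at hy; simpa using hy), ?_⟩
        rw [hw]; simpa using h1
    · -- (ii) prefix elements ≤ suffix elements
      intro a ha y hy
      have ha2 : a ∈ t.take (m + 2) := by
        refine htake.mem_iff.1 ?_
        rw [hsplit]
        exact List.mem_append_left _ ha
      cases hd : (passN (m + 1) t).1.drop (m + 1) with
      | nil => rw [hd] at hy; simp at hy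
      | cons z w =>
        have hw : w = t.drop (m + 2) := by
          have := htail; rw [hd] at this; simpa using this
        rw [hd] at hy
        rcases List.mem_cons.1 hy with rfl | hyw
        · exact hmax a ha2 y (by rw [hd]; simp)
        · exact h2 a ha2 y (by rw [hw] at hyw; simpa using hyw)

lemma sumTo_mul_two (m : Nat) : sumTo m * 2 = m * (m + 1) := by
  induction m with
  | zero => rfl
  | succ m ih => simp [sumTo, Nat.succ_mul, Nat.mul_succ] at *; omega

-- ===== bridges between the ports and the model =====

lemma inner_bridge (k : Nat) : ∀ (p : Nat) (u v : List Int) (c e : Int),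
    u.length = p → k < v.length →
    (PySem.List.pyRange (p : Int) ((p : Int) + (k : Int)) 1).foldl
      (fun (st2 : List Int × Int × Int) j =>
        let a := PySem.List.pyGetD st2.1 j 0
        let b := PySem.List.pyGetD st2.1 (j + 1) 0
        if a > b then
          (PySem.List.pySetD (PySem.List.pySetD st2.1 j b) (j + 1) a,
           st2.2.1 + 1, st2.2.2 + 1)
        else
          (st2.1, st2.2.1 + 1, st2.2.2)) (u ++ v, c, e)
      = (u ++ (passN k v).1, c + (k : Int), e + ((passN k v).2 : Int)) := by
  induction k with
  | zero =>
    intro p u v c e hu hk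
    rw [PySem.List.pyRange_one_eq_nil (by omega)]
    simp [passN]
  | succ k ih =>
    intro p u v c e hu hk
    match v with
    | [] => simp at hk
    | [x] => simp at hk
    | x :: y :: t =>
      subst hu
      rw [PySem.List.pyRange_one_cons (by push_cast; omega)]
      simp only [List.foldl_cons]
      have ha : PySem.List.pyGetD (u ++ x :: y :: t) ((u.length : Int)) 0 = x := by
        rw [PySem.List.pyGetD_natCast]
        simp [List.getD_eq_getElem?_getD]
      have hb : PySem.List.pyGetD (u ++ x :: y :: t) ((u.length : Int) + 1) 0 = y := by
        rw [show ((u.length : Int) + 1) = ((u.length + 1 : Nat) : Int) by push_cast; ring,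
          PySem.List.pyGetD_natCast]
        simp [List.getD_eq_getElem?_getD]
      have hk' : k < t.length + 1 := by simp at hk; omega
      by_cases hxy : x > y
      · have hset : PySem.List.pySetD (PySem.List.pySetD (u ++ x :: y :: t)
            ((u.length : Int)) y) ((u.length : Int) + 1) x = (u ++ [y]) ++ x :: t := by
          rw [show ((u.length : Int) + 1) = ((u.length + 1 : Nat) : Int) by push_cast; ring,
            PySem.List.pySetD_natCast, PySem.List.pySetD_natCast]
          simp
        simp only [ha, hb, if_pos hxy, hset]
        rw [show ((u.length : Int) + 1) = (((u ++ [y]).length : Nat) : Int) by simp,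
          show ((u.length : Int) + ((k : Nat) + 1 : Nat)) = (((u ++ [y]).length : Nat) : Int) + (k : Int) by simp; ring]
        rw [ih (u ++ [y]).length (u ++ [y]) (x :: t) (c + 1) (e + 1) rfl (by simpa using hk')]
        simp only [passN, if_pos (show y < x from hxy)]
        refine Prod.ext ?_ (Prod.ext ?_ ?_) <;> simp <;> omega
      · simp only [ha, hb, if_neg hxy]
        rw [show ((u.length : Int) + 1) = (((u ++ [x]).length : Nat) : Int) by simp,
          show ((u.length : Int) + ((k : Nat) + 1 : Nat)) = (((u ++ [x]).length : Nat) : Int) + (k : Int) by simp; ring]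
        have hassoc : u ++ x :: y :: t = (u ++ [x]) ++ y :: t := by simp
        rw [hassoc, ih (u ++ [x]).length (u ++ [x]) (y :: t) (c + 1) e rfl (by simpa using hk')]
        simp only [passN, if_neg (show ¬ y < x from hxy)]
        refine Prod.ext ?_ (Prod.ext ?_ ?_) <;> simp
        omega

lemma outer_bridge (m : Nat) : ∀ (t : List Int) (c e : Int), m < t.length →
    (PySem.List.pyRange (m : Int) 0 (-1)).foldl
      (fun (st : List Int × Int × Int) i =>
        (PySem.List.pyRange 0 i 1).foldl
          (fun (st2 : List Int × Int × Int) j =>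
            let a := PySem.List.pyGetD st2.1 j 0
            let b := PySem.List.pyGetD st2.1 (j + 1) 0
            if a > b then
              (PySem.List.pySetD (PySem.List.pySetD st2.1 j b) (j + 1) a,
               st2.2.1 + 1, st2.2.2 + 1)
            else
              (st2.1, st2.2.1 + 1, st2.2.2)) st) (t, c, e)
      = ((sweep m t).1, c + (sumTo m : Int), e + ((sweep m t).2 : Int)) := by
  induction m with
  | zero =>
    intro t c e _
    rw [PySem.List.pyRange_neg_one_eq_nil (by norm_num)]
    simp [sweep, sumTo]
  | succ m ih =>
    intro t c e hm
    rw [PySem.List.pyRange_neg_one_cons (by positivity)]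
    simp only [List.foldl_cons]
    have hinner := inner_bridge (m + 1) 0 [] t c e rfl (by simpa using hm)
    simp only [Nat.cast_zero, zero_add, List.nil_append] at hinner
    rw [hinner]
    rw [show ((((m : Nat) + 1 : Nat) : Int) - 1) = ((m : Nat) : Int) by push_cast; ring]
    have hm' : m < (passN (m + 1) t).1.length := by
      rw [passN_length]; omega
    rw [ih (passN (m + 1) t).1 (c + ((m + 1 : Nat) : Int)) (e + ((passN (m + 1) t).2 : Int)) hm']
    simp only [sweep, sumTo]
    refine Prod.ext (by simp) (Prod.ext ?_ ?_) <;> simp <;> omega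

lemma alt_count (t : List Int) : ∀ (t0 : List Int) (j : Nat) (e : Int),
    t0.drop j = t →
    (PySem.List.enumerate t (j : Int)).foldl
      (fun (e : Int) jx =>
        (PySem.List.slice t0 (some (jx.1 + 1)) none).foldl
          (fun (e : Int) y => if jx.2 > y then e + 1 else e) e) e
      = e + (inv t : Int) := by
  induction t with
  | nil => intro t0 j e _; simp [PySem.List.enumerate, inv]
  | cons x t ih =>
    intro t0 j e ht
    rw [PySem.List.enumerate_cons]
    simp only [List.foldl_cons]
    have hdropsucc : t0.drop (j + 1) = t := by
      have : (t0.drop j).drop 1 = t0.drop (j + 1) := List.drop_drop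
      rw [ht] at this
      simpa using this.symm
    have hs : PySem.List.slice t0 (some ((j : Int) + 1)) none = t := by
      rw [show ((j : Int) + 1) = ((j + 1 : Nat) : Int) by push_cast; ring,
        PySem.List.slice_from _ (by positivity)]
      simpa using hdropsucc
    rw [hs]
    have hfold : t.foldl (fun (e : Int) y => if x > y then e + 1 else e) e
        = e + (t.countP (fun y => decide (y < x)) : Int) := by
      simpa using PySem.List.foldl_ite_add_one (fun y => y < x) t e
    rw [hfold, show ((j : Int) + 1) = ((j + 1 : Nat) : Int) by push_cast; ring,
      ih t0 (j + 1) _ hdropsucc]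
    simp only [inv]
    push_cast
    ring

lemma triBulles_eq (t : List Int) :
    triBulles t = (PySem.Int.floordiv ((t.length : Int) * ((t.length : Int) - 1)) 2,
                   (inv t : Int)) := by
  match t with
  | [] =>
    unfold triBulles
    rw [PySem.List.pyRange_neg_one_eq_nil (by norm_num)]
    simp [inv]
  | a :: t' =>
    unfold triBulles
    have e1 : (((a :: t').length : Int) - 1) = ((t'.length : Nat) : Int) := by
      simp
    rw [e1, outer_bridge t'.length (a :: t') 0 0 (by simp)]
    have hsorted : ((sweep t'.length (a :: t')).1).Pairwise (· ≤ ·) := by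
      apply sweep_sorted
      · simp
      · intro x hx y hy
        simp at hy
    have hswap : (sweep t'.length (a :: t')).2 = inv (a :: t') := by
      have h := sweep_swaps t'.length (a :: t')
      rw [inv_sorted _ hsorted] at h
      omega
    have hcomp : ((sumTo t'.length : Nat) : Int)
        = PySem.Int.floordiv (((a :: t').length : Int) * (((a :: t').length : Int) - 1)) 2 := by
      rw [show (((a :: t').length : Int) * (((a :: t').length : Int) - 1))
            = (((t'.length + 1) * t'.length : Nat) : Int) by
          simp only [List.length_cons]; push_cast; try ring,
        show (2 : Int) = ((2 : Nat) : Int) from rfl, PySem.Int.floordiv_natCast]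
      have hnat : (t'.length + 1) * t'.length = sumTo t'.length * 2 := by
        rw [sumTo_mul_two t'.length]; ring
      rw [hnat, Nat.mul_div_cancel _ (by norm_num)]
    simp only [hswap, zero_add]
    rw [hcomp, e1]

lemma triBulles_alt_eq (t : List Int) :
    triBulles_alt t = (PySem.Int.floordiv ((t.length : Int) * ((t.length : Int) - 1)) 2,
                       (inv t : Int)) := by
  unfold triBulles_alt
  have := alt_count t t 0 0 (by simp)
  simp only [Nat.cast_zero] at this
  rw [this]
  simp

-- ===== VERDICT (by name: the statement is the Claim_ definition above) =====
theorem triBulles_spec : Claim_equal_triBulles := by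
  intro t _
  show _ = _
  rw [triBulles_eq, triBulles_alt_eq]
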